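-- pv_equiv track=rewrite | github.com/nnyam3831/algo-study | kakao/2019_blind/무지의 먹방 라이브/solve.py | solution
-- ===== SOURCE A (Python) =====
-- from queue import PriorityQueue
--
-- def solution(food_times, k):
--     if sum(food_times) <= k:
--         return -1
--
--     answer, length = 0, len(food_times)
--     q = PriorityQueue()
--     for i in range(length):
--         q.put((food_times[i], i + 1))
--     accum, prev = 0, 0
--
--     while accum + (q.queue[0][0] - prev) * length <= k:
--         now = q.get()[0]
--         accum += (now - prev) * length
--         length -= 1
--         prev = now
--
--     result = sorted(q.queue, key=lambda x: x[1])
--     answer = result[(k - accum) % length][1]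
--     return answer
-- ===== SOURCE B (Python) =====
-- def solution(food_times, k):
--     if sum(food_times) <= k:
--         return -1
--     # Binary search the largest threshold T with sum(min(t, T)) <= k: every plate
--     # with t <= T has been finished by second sum(min(t, T)); survivors keep rotating.
--     lo, hi = min(k, min(food_times), 0), max(food_times)
--     while lo < hi:
--         mid = (lo + hi + 1) // 2
--         if sum(min(t, mid) for t in food_times) <= k:
--             lo = mid
--         else:
--             hi = mid - 1
--     survivors = [i + 1 for i, t in enumerate(food_times) if t > lo]
--     prev = max((t for t in food_times if t <= lo), default=0)
--     accum = sum(t for t in food_times if t <= lo) + prev * len(survivors)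
--     return survivors[(k - accum) % len(survivors)]
-- ===== Notes on version B (the rewrite author's own statement) =====
-- stated objective: alternative
-- what changed: Replaced A's priority-queue simulation of the eating rounds by a binary search for the largest threshold T with sum(min(t, T)) <= k, after which the answer is read directly from the plates with t > T in index order; no heap, no sort, no sequential pop loop.
import Mathlib
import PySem

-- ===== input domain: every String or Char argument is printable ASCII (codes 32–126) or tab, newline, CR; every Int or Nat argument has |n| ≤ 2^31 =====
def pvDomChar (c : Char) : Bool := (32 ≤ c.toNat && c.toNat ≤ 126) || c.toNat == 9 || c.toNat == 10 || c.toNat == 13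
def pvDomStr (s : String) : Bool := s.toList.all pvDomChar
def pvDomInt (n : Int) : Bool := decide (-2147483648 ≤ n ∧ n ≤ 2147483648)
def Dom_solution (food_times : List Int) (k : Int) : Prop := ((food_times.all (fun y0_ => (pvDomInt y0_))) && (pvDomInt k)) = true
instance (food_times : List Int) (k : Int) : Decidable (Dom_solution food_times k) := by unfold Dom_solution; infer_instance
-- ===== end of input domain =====

-- B replaces A's priority-queue simulation by a binary search for the largest
-- threshold T with sum(min(t, T)) <= k, then reads the answer off the survivors
-- (t > T) directly (objective: alternative); same return value on every Pre_ input.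

-- ===== PORT A =====
-- A's PriorityQueue is modelled as the bag (list) of its items: the heap root
-- q.queue[0] is the tuple-minimum of the bag, q.get() removes it, and
-- sorted(q.queue, key=lambda x: x[1]) depends only on the bag (not the heap layout),
-- so the model is exact for every operation A performs on the queue.

-- Python tuple comparison (t1, i1) < (t2, i2)
def pairLt (x y : Int × Int) : Bool := decide (x.1 < y.1) || (decide (x.1 = y.1) && decide (x.2 < y.2))

-- q.queue[0] / q.get(): the minimum of the bag (none = empty heap, where Python raises)
def qMin : List (Int × Int) → Option (Int × Int)
  | [] => none
  | x :: t => some (t.foldl (fun m y => if pairLt y m then y else m) x)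

-- needed by solLoop's decreasing_by
lemma foldlMin_mem (t : List (Int × Int)) (a : Int × Int) :
    t.foldl (fun m y => if pairLt y m then y else m) a = a ∨
      t.foldl (fun m y => if pairLt y m then y else m) a ∈ t := by
  induction t generalizing a with
  | nil => simp
  | cons y t ih =>
    simp only [List.foldl_cons]
    by_cases hy : pairLt y a = true
    · rw [if_pos hy]
      rcases ih y with h | h
      · rw [h]; right; exact List.mem_cons_self
      · right; exact List.mem_cons_of_mem _ h
    · rw [if_neg hy]
      rcases ih a with h | h
      · left; exact h
      · right; exact List.mem_cons_of_mem _ h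

-- needed by solLoop's decreasing_by
lemma qMin_mem {q : List (Int × Int)} {m : Int × Int} (h : qMin q = some m) : m ∈ q := by
  cases q with
  | nil => simp [qMin] at h
  | cons x t =>
    simp only [qMin, Option.some.injEq] at h
    rw [← h]
    rcases foldlMin_mem t x with h2 | h2
    · rw [h2]; exact List.mem_cons_self
    · exact List.mem_cons_of_mem _ h2

-- the while loop of A (state: heap bag q, length, accum, prev)
def solLoop (k : Int) (q : List (Int × Int)) (length accum prev : Int) : Int :=
  match hm : qMin q with
  | none => 0   -- Python: IndexError on q.queue[0] of an empty heap; outside Pre_solution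
  | some m =>
    if accum + (m.1 - prev) * length ≤ k then
      solLoop k (q.erase m) (length - 1) (accum + (m.1 - prev) * length) m.1
    else
      match PySem.List.pyGet? (PySem.List.sorted q (fun p => p.2)) (PySem.Int.mod (k - accum) length) with
      | some r => r.2
      | none => 0   -- IndexError; unreachable on inputs where Python A returns
termination_by q.length
decreasing_by
  have hmem := qMin_mem hm
  have h1 := List.length_erase_of_mem hmem
  have h2 := List.length_pos_of_mem hmem
  omega

def solution (food_times : List Int) (k : Int) : Int :=
  if food_times.sum ≤ k then -1
  else
    solLoop k (food_times.zipIdx.map (fun p => (p.1, (p.2 : Int) + 1)))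
      (food_times.length : Int) 0 0

-- ===== PORT B =====
-- sum(min(t, T) for t in food_times)
def eatenAmt (food_times : List Int) (T : Int) : Int := (food_times.map (fun t => min t T)).sum

-- the while-loop of B's binary search for the largest T with eatenAmt <= k
def bsLoop (food_times : List Int) (k lo hi : Int) : Int :=
  if lo < hi then
    if eatenAmt food_times (PySem.Int.floordiv (lo + hi + 1) 2) ≤ k then
      bsLoop food_times k (PySem.Int.floordiv (lo + hi + 1) 2) hi
    else
      bsLoop food_times k lo (PySem.Int.floordiv (lo + hi + 1) 2 - 1)
  else lo
termination_by (hi - lo).toNat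
decreasing_by
  all_goals
    have hb := PySem.Int.floordiv_two_mid_bounds (lo := lo + 1) (hi := hi) (by omega)
    rw [show lo + 1 + hi = lo + hi + 1 by ring] at hb
    omega

def solution_alt (food_times : List Int) (k : Int) : Int :=
  if food_times.sum ≤ k then -1
  else
    match PySem.List.min? food_times (fun t => t), PySem.List.max? food_times (fun t => t) with
    | some mn, some mx =>
      let T := bsLoop food_times k (min (min k mn) 0) mx
      let survivors := ((PySem.List.enumerate food_times 0).filter
        (fun p => decide (T < p.2))).map (fun p => p.1 + 1)
      let prev := PySem.List.maxD (food_times.filter (fun t => decide (t ≤ T))) (fun t => t) 0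
      let accum := (food_times.filter (fun t => decide (t ≤ T))).sum + prev * (survivors.length : Int)
      match PySem.List.pyGet? survivors (PySem.Int.mod (k - accum) (survivors.length : Int)) with
      | some r => r
      | none => 0
    | _, _ => 0   -- min()/max() of the empty list: ValueError; outside Pre_solution

-- ===== PRECONDITION & SPEC =====
-- Pre_ excludes only the inputs on which Python A raises (IndexError: empty
-- food_times with k < 0; B raises ValueError there too).
def Pre_solution (food_times : List Int) (k : Int) : Prop := food_times ≠ [] ∨ 0 ≤ k
instance (food_times : List Int) (k : Int) : Decidable (Pre_solution food_times k) := by unfold Pre_solution; infer_instance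
def pvWitness_solution : List Int × Int := ([3, 1, 2], 5)

def Spec_solution (food_times : List Int) (k : Int) (out : Int) : Prop := out = solution_alt food_times k
instance (food_times : List Int) (k : Int) (out : Int) : Decidable (Spec_solution food_times k out) := by unfold Spec_solution; infer_instance

-- ===== CLAIM (what is proved, stated in full; the proofs are below) =====
def Claim_equal_solution : Prop := ∀ (food_times : List Int) (k : Int), Dom_solution food_times k → Pre_solution food_times k → Spec_solution food_times k (solution food_times k)

-- ===== LEMMAS AND PROOFS =====

-- proof-side orders on pairs: Python's lexicographic ≤ / < on (time, index), and
-- distinctness of the index components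
def LeP (a b : Int × Int) : Prop := a.1 < b.1 ∨ (a.1 = b.1 ∧ a.2 ≤ b.2)
def LtP (a b : Int × Int) : Prop := a.1 < b.1 ∨ (a.1 = b.1 ∧ a.2 < b.2)
def SneP (a b : Int × Int) : Prop := a.2 ≠ b.2

-- the (time, index+1) pairs A feeds to the heap / B sorts, as one name
def pairsOf (ft : List Int) : List (Int × Int) :=
  ft.zipIdx.map (fun p => (p.1, (p.2 : Int) + 1))

lemma pairLt_iff {x y : Int × Int} : pairLt x y = true ↔ LtP x y := by
  simp only [pairLt, Bool.or_eq_true, Bool.and_eq_true, decide_eq_true_eq, LtP]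

lemma LtP_le {a b : Int × Int} (h : LtP a b) : LeP a b := by
  simp only [LtP, LeP] at *; omega

lemma LeP_trans {a b c : Int × Int} (h1 : LeP a b) (h2 : LeP b c) : LeP a c := by
  simp only [LeP] at *; omega

lemma LeP_of_not_lt {a b : Int × Int} (h : ¬ pairLt a b = true) : LeP b a := by
  rw [pairLt_iff] at h
  simp only [LtP, LeP] at *; omega

lemma foldlMin_le (t : List (Int × Int)) (a : Int × Int) :
    LeP (t.foldl (fun m y => if pairLt y m then y else m) a) a ∧
      ∀ y ∈ t, LeP (t.foldl (fun m y => if pairLt y m then y else m) a) y := by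
  induction t generalizing a with
  | nil => simp [LeP]
  | cons y t ih =>
    simp only [List.foldl_cons]
    by_cases hy : pairLt y a = true
    · rw [if_pos hy]
      rcases ih y with ⟨h1, h2⟩
      have hya : LeP y a := LtP_le (pairLt_iff.mp hy)
      refine ⟨LeP_trans h1 hya, ?_⟩
      intro z hz
      rcases List.mem_cons.mp hz with rfl | hz
      · exact h1
      · exact h2 z hz
    · rw [if_neg hy]
      rcases ih a with ⟨h1, h2⟩
      refine ⟨h1, ?_⟩
      intro z hz
      rcases List.mem_cons.mp hz with rfl | hz
      · exact LeP_trans h1 (LeP_of_not_lt hy)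
      · exact h2 z hz

-- in a bag that is a permutation of a strictly lex-sorted nonempty list, the heap min is the head
lemma qMin_eq_head {q : List (Int × Int)} {x : Int × Int} {t : List (Int × Int)}
    (hperm : q.Perm (x :: t)) (hsort : (x :: t).Pairwise LtP) : qMin q = some x := by
  cases q with
  | nil => exact absurd (hperm.symm.eq_nil) (by simp)
  | cons a s =>
    simp only [qMin, Option.some.injEq]
    have hmem : (s.foldl (fun m y => if pairLt y m then y else m) a) ∈ a :: s := by
      rcases foldlMin_mem s a with h | h
      · rw [h]; exact List.mem_cons_self
      · exact List.mem_cons_of_mem _ h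
    have hle : ∀ y ∈ a :: s, LeP (s.foldl (fun m y => if pairLt y m then y else m) a) y := by
      intro y hy
      rcases List.mem_cons.mp hy with h' | hy
      · rw [h']; exact (foldlMin_le s a).1
      · exact (foldlMin_le s a).2 y hy
    rcases List.mem_cons.mp (hperm.mem_iff.mp hmem) with h | h
    · exact h
    · exfalso
      have hxm : LtP x (s.foldl (fun m y => if pairLt y m then y else m) a) :=
        (List.pairwise_cons.mp hsort).1 _ h
      have hmx := hle x (hperm.mem_iff.mpr List.mem_cons_self)
      simp only [LtP, LeP] at hxm hmx
      omega

-- sorted-by-index of two permuted lists with distinct indices agree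
lemma sorted_snd_eq {q rem : List (Int × Int)} (hperm : q.Perm rem)
    (hsne : rem.Pairwise SneP) :
    PySem.List.sorted q (fun p => p.2) = PySem.List.sorted rem (fun p => p.2) := by
  apply PySem.List.sorted_eq_of_perm_of_pairwise_lt
  · exact (PySem.List.sorted_perm rem (fun p => p.2) false).trans hperm.symm
  · have h1 : (PySem.List.sorted rem (fun p => p.2) false).Pairwise
        (fun a b : Int × Int => a.2 ≤ b.2) := PySem.List.sorted_pairwise rem (fun p => p.2)
    have h2 : (PySem.List.sorted rem (fun p => p.2) false).Pairwise SneP := by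
      refine hsne.perm (PySem.List.sorted_perm rem (fun p => p.2) false).symm ?_
      intro a b hab
      exact fun h => hab h.symm
    refine (h1.and h2).imp ?_
    intro a b hab
    obtain ⟨hle, hne⟩ := hab
    simp only [SneP] at hne
    omega

-- proof-side reference walk: A's loop replayed over the strictly sorted pair list
def walk (k : Int) : List (Int × Int) → Int → Int → Int → Int
  | [], _, _, _ => 0
  | x :: t, length, accum, prev =>
    if accum + (x.1 - prev) * length ≤ k then
      walk k t (length - 1) (accum + (x.1 - prev) * length) x.1
    else
      match PySem.List.pyGet? (PySem.List.sorted (x :: t) (fun p => p.2)) (PySem.Int.mod (k - accum) length) with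
      | some r => r.2
      | none => 0

-- the coupled loop invariant: A's extract-min loop on any bag permutation of the
-- strictly sorted remaining suffix computes the same value as the reference walk
lemma loop_eq (k : Int) (rem : List (Int × Int)) : ∀ (q : List (Int × Int)) (length accum prev : Int),
    q.Perm rem → rem.Pairwise LtP → rem.Pairwise SneP →
    solLoop k q length accum prev = walk k rem length accum prev := by
  induction rem with
  | nil =>
    intro q length accum prev hperm _ _
    rw [hperm.eq_nil]
    rw [solLoop, walk]
    rfl
  | cons x t ih =>
    intro q length accum prev hperm hsort hsne
    have hq : qMin q = some x := qMin_eq_head hperm hsort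
    rw [solLoop, walk, hq]
    by_cases hc : accum + (x.1 - prev) * length ≤ k
    · simp only [if_pos hc]
      apply ih
      · have := hperm.erase x
        rwa [List.erase_cons_head] at this
      · exact (List.pairwise_cons.mp hsort).2
      · exact (List.pairwise_cons.mp hsne).2
    · simp only [if_neg hc]
      rw [sorted_snd_eq hperm hsne]

-- the comparator inside PySem.List.sorted2 with keys fst and snd
def bLt (a b : Int × Int) : Bool := decide (a.1 < b.1) || (!decide (b.1 < a.1) && decide (a.2 < b.2))

-- the (non-strict) order the insertion sort establishes
def RB (a b : Int × Int) : Prop := bLt b a = false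

lemma RB_iff {a b : Int × Int} : RB a b ↔ LeP a b := by
  simp only [RB, bLt, Bool.or_eq_false_iff, Bool.and_eq_false_iff,
    decide_eq_false_iff_not, Bool.not_eq_false', decide_eq_true_eq, LeP]
  omega

lemma insertBy_pairwise (x : Int × Int) : ∀ (ys : List (Int × Int)),
    ys.Pairwise RB → (PySem.List.insertBy bLt x ys).Pairwise RB
  | [], _ => by simp [PySem.List.insertBy]
  | y :: ys, h => by
    rw [PySem.List.insertBy]
    rcases List.pairwise_cons.mp h with ⟨hy, hys⟩
    by_cases hb : bLt x y = true
    · rw [if_pos hb]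
      have hxy : LeP x y := by
        have : RB x y := by
          simp only [bLt, Bool.or_eq_true, Bool.and_eq_true, decide_eq_true_eq,
            Bool.not_eq_true', decide_eq_false_iff_not] at hb
          simp only [RB, bLt, Bool.or_eq_false_iff, Bool.and_eq_false_iff,
            decide_eq_false_iff_not, Bool.not_eq_false', decide_eq_true_eq]
          omega
        exact RB_iff.mp this
      refine List.pairwise_cons.mpr ⟨?_, h⟩
      intro z hz
      rcases List.mem_cons.mp hz with rfl | hz
      · exact RB_iff.mpr hxy
      · exact RB_iff.mpr (LeP_trans hxy (RB_iff.mp (hy z hz)))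
    · rw [if_neg hb]
      refine List.pairwise_cons.mpr ⟨?_, insertBy_pairwise x ys hys⟩
      intro z hz
      rcases (PySem.List.mem_insertBy bLt x z ys).mp hz with rfl | hz
      · exact eq_false_of_ne_true hb
      · exact hy z hz

lemma foldl_insertBy_pairwise (xs : List (Int × Int)) :
    (xs.foldl (fun acc y => PySem.List.insertBy bLt y acc) []).Pairwise RB := by
  suffices h : ∀ acc, acc.Pairwise RB → (xs.foldl (fun acc y => PySem.List.insertBy bLt y acc) acc).Pairwise RB from
    h [] (by simp)
  induction xs with
  | nil => intro acc h; simpa using h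
  | cons x xs ih =>
    intro acc h
    exact ih _ (insertBy_pairwise x acc h)

lemma sorted2_pairwise (xs : List (Int × Int)) :
    (PySem.List.sorted2 xs (fun p => p.1) (fun p => p.2)).Pairwise RB := by
  have : PySem.List.sorted2 xs (fun p => (p.1 : Int)) (fun p => (p.2 : Int)) =
      xs.foldl (fun acc y => PySem.List.insertBy bLt y acc) [] := rfl
  rw [this]
  exact foldl_insertBy_pairwise xs

lemma pairs_snd_lt (ft : List Int) :
    (pairsOf ft).Pairwise (fun a b : Int × Int => a.2 < b.2) := by
  rw [pairsOf, List.pairwise_iff_getElem]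
  intro i j hi hj hij
  simp only [List.getElem_map, List.getElem_zipIdx] at *
  simp only [List.length_map, List.length_zipIdx] at hi hj
  omega

lemma pairs_map_fst (ft : List Int) : (pairsOf ft).map (fun p => p.1) = ft := by
  rw [pairsOf, List.map_map]
  exact List.zipIdx_map_fst 0 ft

lemma mem_fst_pairs {ft : List Int} {x : Int × Int} (h : x ∈ pairsOf ft) : x.1 ∈ ft := by
  rw [← pairs_map_fst ft]
  exact List.mem_map_of_mem h

-- monotonicity of sum(min(t, T))
lemma eaten_mono (ft : List Int) {a b : Int} (h : a ≤ b) : eatenAmt ft a ≤ eatenAmt ft b := by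
  unfold eatenAmt
  apply List.sum_le_sum
  intro t _
  exact min_le_min le_rfl h

-- splitting sum(min(t, m)) along a popped-prefix / suffix decomposition of the pairs
lemma eaten_split (ft : List Int) (P s : List (Int × Int)) (m : Int)
    (hperm : (P ++ s).Perm (pairsOf ft))
    (hP : ∀ p ∈ P, p.1 ≤ m) (hs : ∀ q ∈ s, m ≤ q.1) :
    eatenAmt ft m = (P.map (fun p => p.1)).sum + m * (s.length : Int) := by
  unfold eatenAmt
  rw [← pairs_map_fst ft, List.map_map]
  have hp2 : ((P ++ s).map ((fun t => min t m) ∘ fun p => p.1)).Perm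
      ((pairsOf ft).map ((fun t => min t m) ∘ fun p => p.1)) := hperm.map _
  rw [← hp2.sum_eq, List.map_append, List.sum_append]
  have h1 : P.map ((fun t => min t m) ∘ fun p => p.1) = P.map (fun p => p.1) := by
    apply List.map_congr_left
    intro p hp
    simp [min_eq_left (hP p hp)]
  have h2 : s.map ((fun t => min t m) ∘ fun p => p.1) = s.map (fun _ => m) := by
    apply List.map_congr_left
    intro q hq
    simp [min_eq_right (hs q hq)]
  rw [h1, h2, PySem.List.sum_map_const_int]
  ring

-- binary-search correctness: the result keeps eatenAmt ≤ k and everything above it up to H exceeds k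
lemma bs_spec (ft : List Int) (k H : Int) :
    ∀ (n : Nat) (lo hi : Int), (hi - lo).toNat = n → lo ≤ hi → hi ≤ H →
      eatenAmt ft lo ≤ k → (∀ x, hi < x → x ≤ H → k < eatenAmt ft x) →
      eatenAmt ft (bsLoop ft k lo hi) ≤ k ∧
        ∀ x, bsLoop ft k lo hi < x → x ≤ H → k < eatenAmt ft x := by
  intro n
  induction n using Nat.strong_induction_on with
  | _ n ih =>
    intro lo hi hn hlohi hhiH hlo hhi
    rw [bsLoop]
    by_cases hlt : lo < hi
    · rw [if_pos hlt]
      have hb := PySem.Int.floordiv_two_mid_bounds (lo := lo + 1) (hi := hi) (by omega)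
      rw [show lo + 1 + hi = lo + hi + 1 by ring] at hb
      by_cases hc : eatenAmt ft (PySem.Int.floordiv (lo + hi + 1) 2) ≤ k
      · rw [if_pos hc]
        exact ih (hi - PySem.Int.floordiv (lo + hi + 1) 2).toNat (by omega) _ hi rfl
          (by omega) hhiH hc hhi
      · rw [if_neg hc]
        refine ih (PySem.Int.floordiv (lo + hi + 1) 2 - 1 - lo).toNat (by omega) lo _ rfl
          (by omega) (by omega) hlo ?_
        intro x hx hxH
        by_cases hxhi : hi < x
        · exact hhi x hxhi hxH
        · exact lt_of_lt_of_le (lt_of_not_ge hc) (eaten_mono ft (by omega))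
    · rw [if_neg hlt]
      have : lo = hi := by omega
      subst this
      exact ⟨hlo, hhi⟩

-- max(l, default=0) with identity key is the greatest element when one dominates
lemma maxD_id_eq {l : List Int} {m : Int} (hm : m ∈ l) (hb : ∀ x ∈ l, x ≤ m) :
    PySem.List.maxD l (fun t => t) 0 = m := by
  cases l with
  | nil => cases hm
  | cons x t =>
    simp only [PySem.List.maxD, PySem.List.max?_id_cons, Option.getD_some]
    have h1 := PySem.List.le_foldl_max t x
    apply le_antisymm
    · rcases PySem.List.foldl_max_mem t x with h | h
      · rw [h]; exact hb x List.mem_cons_self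
      · exact hb _ (List.mem_cons_of_mem _ h)
    · rcases List.mem_cons.mp hm with rfl | h
      · exact h1.1
      · exact h1.2 m h

lemma pyGet?_map {α β : Type} (l : List α) (f : α → β) (i : Int) :
    PySem.List.pyGet? (l.map f) i = (PySem.List.pyGet? l i).map f := by
  simp [PySem.List.pyGet?, PySem.List.pyIdx?]

-- B's tail after the binary search, as one closed expression in T
def altStop (ft : List Int) (k T : Int) : Int :=
  let survivors := ((PySem.List.enumerate ft 0).filter
    (fun p => decide (T < p.2))).map (fun p => p.1 + 1)
  let prev := PySem.List.maxD (ft.filter (fun t => decide (t ≤ T))) (fun t => t) 0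
  let accum := (ft.filter (fun t => decide (t ≤ T))).sum + prev * (survivors.length : Int)
  match PySem.List.pyGet? survivors (PySem.Int.mod (k - accum) (survivors.length : Int)) with
  | some r => r
  | none => 0

lemma alt_unfold {ft : List Int} {k mn mx : Int} (hsum : ¬ ft.sum ≤ k)
    (hmin : PySem.List.min? ft (fun t => t) = some mn)
    (hmax : PySem.List.max? ft (fun t => t) = some mx) :
    solution_alt ft k = altStop ft k (bsLoop ft k (min (min k mn) 0) mx) := by
  rw [solution_alt, if_neg hsum, hmin, hmax]
  rfl

-- B's survivor list is the index projection of the pairs with time above T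
lemma surv_eq (ft : List Int) (T : Int) :
    ((PySem.List.enumerate ft 0).filter (fun p => decide (T < p.2))).map (fun p => p.1 + 1)
      = ((pairsOf ft).filter (fun q => decide (T < q.1))).map (fun q => q.2) := by
  rw [PySem.List.enumerate_eq_zipIdx_map, pairsOf, List.filter_map, List.filter_map,
    List.map_map, List.map_map]
  simp [Function.comp_def]

-- the main coupling: A's walk over the strictly sorted pairs equals B's closed form
lemma walk_eq (ft : List Int) (k T : Int)
    (hle : eatenAmt ft T ≤ k)
    (hgt : ∀ v ∈ ft, T < v → k < eatenAmt ft v)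
    (hsum : ¬ ft.sum ≤ k) :
    ∀ (s : List (Int × Int)), ∀ (P : List (Int × Int)) (prev : Int),
      (P ++ s).Perm (pairsOf ft) →
      s.Pairwise LtP →
      (∀ p ∈ P, ∀ q ∈ s, p.1 ≤ q.1) →
      (∀ p ∈ P, p.1 ≤ T) →
      ((P = [] ∧ prev = 0) ∨ (prev ∈ P.map (fun p => p.1) ∧ ∀ p ∈ P, p.1 ≤ prev)) →
      walk k s ((s.length : Int)) ((P.map (fun p => p.1)).sum + prev * (s.length : Int)) prev
        = altStop ft k T := by
  intro s
  induction s with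
  | nil =>
    intro P prev hperm _ _ hPT _
    exfalso
    have h1 : eatenAmt ft T = ft.sum := by
      unfold eatenAmt
      rw [← pairs_map_fst ft, List.map_map]
      apply congrArg List.sum
      apply List.map_congr_left
      intro p hp
      have hpP : p ∈ P := by
        have := (hperm.mem_iff (a := p)).mpr hp
        simpa using this
      simp [min_eq_left (hPT p hpP)]
    omega
  | cons x t ih =>
    intro P prev hperm hsort hPle hPT hprev
    have hxmem : x.1 ∈ ft := mem_fst_pairs ((hperm.mem_iff).mp (by simp))
    have hsx : ∀ q ∈ x :: t, x.1 ≤ q.1 := by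
      intro q hq
      rcases List.mem_cons.mp hq with rfl | hq
      · exact le_rfl
      · have := (List.pairwise_cons.mp hsort).1 q hq
        simp only [LtP] at this; omega
    have hkey : (P.map (fun p => p.1)).sum + prev * ((x :: t).length : Int) +
        (x.1 - prev) * ((x :: t).length : Int) = eatenAmt ft x.1 := by
      rw [eaten_split ft P (x :: t) x.1 hperm (fun p hp => hPle p hp x List.mem_cons_self) hsx]
      ring
    rw [walk]
    by_cases hc : (P.map (fun p => p.1)).sum + prev * ((x :: t).length : Int) +
        (x.1 - prev) * ((x :: t).length : Int) ≤ k
    · rw [if_pos hc]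
      have hxT : x.1 ≤ T := by
        by_contra hxT
        exact absurd (hkey ▸ hc) (not_le.mpr (hgt x.1 hxmem (by omega)))
      have harith1 : ((x :: t).length : Int) - 1 = (t.length : Int) := by
        simp only [List.length_cons]; push_cast; ring
      have harith2 : (P.map (fun p => p.1)).sum + prev * ((x :: t).length : Int) +
          (x.1 - prev) * ((x :: t).length : Int)
          = (((P ++ [x]).map (fun p => p.1)).sum) + x.1 * (t.length : Int) := by
        rw [List.map_append, List.sum_append]
        simp only [List.map_cons, List.map_nil, List.sum_cons, List.sum_nil, List.length_cons]
        push_cast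
        ring
      rw [harith1, harith2]
      apply ih (P ++ [x]) x.1
      · rw [List.append_assoc]; exact hperm
      · exact (List.pairwise_cons.mp hsort).2
      · intro p hp q hq
        rcases List.mem_append.mp hp with hp | hp
        · exact hPle p hp q (List.mem_cons_of_mem _ hq)
        · rw [List.mem_singleton.mp hp]
          exact hsx q (List.mem_cons_of_mem _ hq)
      · intro p hp
        rcases List.mem_append.mp hp with hp | hp
        · exact hPT p hp
        · rw [List.mem_singleton.mp hp]; exact hxT
      · right
        constructor
        · simp
        · intro p hp
          rcases List.mem_append.mp hp with hp | hp
          · exact hPle p hp x List.mem_cons_self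
          · rw [List.mem_singleton.mp hp]
    · rw [if_neg hc]
      have hkgt : k < eatenAmt ft x.1 := by omega
      have hxT : T < x.1 := by
        by_contra hxT
        exact absurd (le_trans (eaten_mono ft (not_lt.mp hxT)) hle) (not_le.mpr hkgt)
      have hsT : ∀ q ∈ x :: t, T < q.1 := fun q hq => lt_of_lt_of_le hxT (hsx q hq)
      -- the filtered pairs are exactly the remaining suffix, up to order
      have hfP : P.filter (fun q => decide (T < q.1)) = [] := by
        rw [List.filter_eq_nil_iff]
        intro p hp
        simpa using not_lt.mpr (hPT p hp)
      have hfs : (x :: t).filter (fun q => decide (T < q.1)) = x :: t := by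
        rw [List.filter_eq_self]
        intro q hq
        simpa using hsT q hq
      have hfperm : ((pairsOf ft).filter (fun q => decide (T < q.1))).Perm (x :: t) := by
        have := (hperm.filter (fun q => decide (T < q.1))).symm
        rwa [List.filter_append, hfP, hfs, List.nil_append] at this
      have hsorted : PySem.List.sorted (x :: t) (fun p => p.2)
          = (pairsOf ft).filter (fun q => decide (T < q.1)) := by
        apply PySem.List.sorted_eq_of_perm_of_pairwise_lt
        · exact hfperm
        · exact (pairs_snd_lt ft).filter _
      -- prev is B's prev
      have hftfilt : (ft.filter (fun v => decide (v ≤ T))).Perm (P.map (fun p => p.1)) := by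
        have h0 : ((P ++ x :: t).map (fun p => p.1)).Perm ft := by
          rw [← pairs_map_fst ft]; exact hperm.map _
        have h1 := (h0.filter (fun v => decide (v ≤ T))).symm
        rw [List.map_append, List.filter_append] at h1
        have h2 : (P.map (fun p => p.1)).filter (fun v => decide (v ≤ T))
            = P.map (fun p => p.1) := by
          rw [List.filter_eq_self]
          intro v hv
          rw [List.mem_map] at hv
          obtain ⟨p, hp, rfl⟩ := hv
          simpa using hPT p hp
        have h3 : ((x :: t).map (fun p => p.1)).filter (fun v => decide (v ≤ T)) = [] := by
          rw [List.filter_eq_nil_iff]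
          intro v hv
          rw [List.mem_map] at hv
          obtain ⟨q, hq, rfl⟩ := hv
          simpa using not_le.mpr (hsT q hq)
        rw [h2, h3, List.append_nil] at h1
        exact h1
      have hprevB : PySem.List.maxD (ft.filter (fun v => decide (v ≤ T))) (fun t => t) 0
          = prev := by
        rcases hprev with ⟨hP0, hprev0⟩ | ⟨hmem, hbound⟩
        · subst hP0
          have h5 : ft.filter (fun v => decide (v ≤ T)) = [] := by
            rw [List.filter_eq_nil_iff]
            intro v hv
            have := (by simpa using hftfilt : ∀ a ∈ ft, T < a) v hv
            simp; omega
          rw [h5, hprev0]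
          rfl
        · apply maxD_id_eq
          · exact hftfilt.mem_iff.mpr hmem
          · intro v hv
            have hv2 := hftfilt.mem_iff.mp hv
            rw [List.mem_map] at hv2
            obtain ⟨p, hp, rfl⟩ := hv2
            exact hbound p hp
      have hsumB : (ft.filter (fun v => decide (v ≤ T))).sum = (P.map (fun p => p.1)).sum :=
        hftfilt.sum_eq
      -- assemble the stop value
      rw [altStop]
      simp only [surv_eq ft T, hprevB, hsumB, ← hsorted]
      have hlen : ((PySem.List.sorted (x :: t) (fun p => p.2)).map (fun q => q.2)).length
          = (x :: t).length := by
        rw [List.length_map]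
        exact (PySem.List.sorted_perm (x :: t) (fun p => p.2) false).length_eq
      rw [hlen, pyGet?_map]
      cases PySem.List.pyGet? (PySem.List.sorted (x :: t) (fun p => p.2))
          (PySem.Int.mod (k - ((P.map (fun p => p.1)).sum + prev * ((x :: t).length : Int)))
            ((x :: t).length : Int)) with
      | none => rfl
      | some r => rfl

-- ===== VERDICT (by name: the statement is the Claim_ definition above) =====
theorem solution_spec : Claim_equal_solution := by
  intro ft k _ hpre
  unfold Spec_solution
  by_cases hs : ft.sum ≤ k
  · rw [solution, solution_alt, if_pos hs, if_pos hs]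
  · have hne : ft ≠ [] := by
      intro h
      subst h
      rcases hpre with h | h
      · exact h rfl
      · exact hs (by simpa using h)
    obtain ⟨mn, hmin⟩ : ∃ mn, PySem.List.min? ft (fun t => t) = some mn := by
      cases h : PySem.List.min? ft (fun t => t) with
      | none => exact absurd ((PySem.List.min?_eq_none_iff ft _).mp h) hne
      | some mn => exact ⟨mn, rfl⟩
    obtain ⟨mx, hmax⟩ : ∃ mx, PySem.List.max? ft (fun t => t) = some mx := by
      cases h : PySem.List.max? ft (fun t => t) with
      | none => exact absurd ((PySem.List.max?_eq_none_iff ft _).mp h) hne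
      | some mx => exact ⟨mx, rfl⟩
    have hmnL : ∀ v ∈ ft, mn ≤ v := PySem.List.min?_isMin hmin
    have hmxU : ∀ v ∈ ft, v ≤ mx := PySem.List.max?_isMax hmax
    have hlen1 : 1 ≤ ft.length := by
      cases ft with
      | nil => exact absurd rfl hne
      | cons a l => simp
    have hlo0 : eatenAmt ft (min (min k mn) 0) ≤ k := by
      have hconst : eatenAmt ft (min (min k mn) 0) = (ft.length : Int) * min (min k mn) 0 := by
        unfold eatenAmt
        have : ft.map (fun t => min t (min (min k mn) 0)) = ft.map (fun _ => min (min k mn) 0) := by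
          apply List.map_congr_left
          intro v hv
          exact min_eq_right (le_trans (min_le_left _ _) (le_trans (min_le_right _ _) (hmnL v hv)))
        rw [this, PySem.List.sum_map_const_int]
      rw [hconst]
      have h0 : min (min k mn) 0 ≤ 0 := min_le_right _ _
      have hk : min (min k mn) 0 ≤ k := le_trans (min_le_left _ _) (min_le_left _ _)
      nlinarith [hlen1]
    have hlohi : min (min k mn) 0 ≤ mx := by
      have := hmxU mn (PySem.List.min?_mem hmin)
      have h2 : min (min k mn) 0 ≤ mn := le_trans (min_le_left _ _) (min_le_right _ _)
      omega
    obtain ⟨hTle, hTgt⟩ := bs_spec ft k mx (mx - min (min k mn) 0).toNat (min (min k mn) 0) mx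
      rfl hlohi le_rfl hlo0 (fun x h1 h2 => absurd (lt_of_lt_of_le h1 h2) (lt_irrefl mx))
    rw [alt_unfold hs hmin hmax]
    rw [solution, if_neg hs]
    set s := PySem.List.sorted2 (pairsOf ft) (fun p => p.1) (fun p => p.2) with hsdef
    have hperm : (pairsOf ft).Perm s := (PySem.List.sorted2_perm (pairsOf ft) _ _ false).symm
    have hsne : s.Pairwise SneP := by
      refine ((pairs_snd_lt ft).imp ?_).perm hperm (fun {a b} h => fun h2 => h h2.symm)
      intro a b hab
      simp only [SneP]; omega
    have hsort : s.Pairwise LtP := by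
      have h1 := sorted2_pairwise (pairsOf ft)
      have h2 : s.Pairwise SneP := hsne
      refine (h1.and h2).imp ?_
      intro a b hab
      obtain ⟨hab1, hab2⟩ := hab
      have := RB_iff.mp hab1
      simp only [LeP, SneP, LtP] at *
      omega
    have hA : solLoop k (ft.zipIdx.map (fun p => (p.1, (p.2 : Int) + 1))) (ft.length : Int) 0 0
        = walk k s (ft.length : Int) 0 0 :=
      loop_eq k s (pairsOf ft) _ 0 0 hperm hsort hsne
    rw [hA]
    have hlens : (s.length : Int) = (ft.length : Int) := by
      have h1 : s.length = (pairsOf ft).length := hperm.length_eq.symm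
      rw [h1, pairsOf, List.length_map, List.length_zipIdx]
    rw [← hlens]
    have h6 : walk k s ((s.length : Int))
        ((([] : List (Int × Int)).map (fun p => p.1)).sum + 0 * (s.length : Int)) 0
        = altStop ft k (bsLoop ft k (min (min k mn) 0) mx) := by
      refine walk_eq ft k _ hTle
        (fun v hv h => hTgt v h (hmxU v hv)) hs s [] 0 (by simpa using hperm.symm)
        hsort ?_ ?_ (Or.inl ⟨rfl, rfl⟩)
      · intro p hp; cases hp
      · intro p hp; cases hp
    simpa using h6
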